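-- pv_equiv track=rewrite | github.com/definitelynotguru/mf-dl | analyze_mediafire.py | get_mediafire_id
-- ===== SOURCE A (Python) =====
-- def get_mediafire_id(url):
-- 	charset = "qwertyuiopasdfghjklzxcvbnm1234567890"
-- 	candidates = []
--
-- 	current = ""
-- 	for char in url:
-- 		if(char in charset):
-- 			current+=char
-- 		else:
-- 			candidates.append(current)
-- 			current=""
-- 	candidates.append(current)
--
-- 	for cand in candidates:
-- 		if(len(cand) == 15):
-- 			return {"type": "file", "id": cand}
-- 		elif(len(cand) == 13):
-- 			return {"type": "directory", "id": cand}
-- 	return {"type": "unknown", "id": url}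
-- ===== SOURCE B (Python) =====
-- import re
--
-- def get_mediafire_id(url):
--     for tok in re.findall(r'[a-z0-9]+', url):
--         if len(tok) == 15:
--             return {"type": "file", "id": tok}
--         if len(tok) == 13:
--             return {"type": "directory", "id": tok}
--     return {"type": "unknown", "id": url}
-- ===== Notes on version B (the rewrite author's own statement) =====
-- stated objective: idiomatic
-- what changed: Replaces the manual per-character accumulator loop (which also emits empty candidates at every separator) with re.findall(r'[a-z0-9]+', url), scanning only the maximal lowercase-alphanumeric runs.
import Mathlib
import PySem

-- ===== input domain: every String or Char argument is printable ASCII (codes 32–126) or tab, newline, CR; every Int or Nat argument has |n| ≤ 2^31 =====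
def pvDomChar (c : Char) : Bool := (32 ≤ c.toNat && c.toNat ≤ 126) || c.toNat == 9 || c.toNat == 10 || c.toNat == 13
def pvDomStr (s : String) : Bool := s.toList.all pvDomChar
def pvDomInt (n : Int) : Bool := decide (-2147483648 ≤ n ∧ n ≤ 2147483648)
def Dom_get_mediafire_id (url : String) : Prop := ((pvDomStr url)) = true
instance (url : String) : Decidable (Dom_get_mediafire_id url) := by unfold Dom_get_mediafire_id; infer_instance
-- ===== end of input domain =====

-- B tokenizes with re.findall(r'[a-z0-9]+', url) instead of A's per-character accumulator loop; more idiomatic, same return value.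


-- ===== PORT A =====
-- second for-loop of A: scan the candidates, first hit of length 15 / 13 wins
def pvScanA : List (List Char) → String → List (String × String)
  | [], url => [("type", "unknown"), ("id", url)]
  | cand :: rest, url =>
    if cand.length = 15 then [("type", "file"), ("id", String.ofList cand)]
    else if cand.length = 13 then [("type", "directory"), ("id", String.ofList cand)]
    else pvScanA rest url

def get_mediafire_id (url : String) : List (String × String) :=
  -- 'char in charset' for a single char is exactly list membership of the char
  let charset := "qwertyuiopasdfghjklzxcvbnm1234567890".toList
  let st := url.toList.foldl
    (fun (st : List (List Char) × List Char) char =>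
      if charset.contains char then (st.1, st.2 ++ [char])
      else (st.1 ++ [st.2], []))
    ([], [])
  pvScanA (st.1 ++ [st.2]) url

-- ===== PORT B =====
-- the regex character class [a-z0-9]
def pvGood (c : Char) : Bool := ('a' ≤ c && c ≤ 'z') || ('0' ≤ c && c ≤ '9')

-- re.findall(r'[a-z0-9]+', url): the maximal runs of pvGood chars, in order
def pvTokens : List Char → List (List Char)
  | [] => []
  | c :: cs =>
    if pvGood c then
      ((c :: cs).takeWhile pvGood) :: pvTokens ((c :: cs).dropWhile pvGood)
    else pvTokens cs
termination_by cs => cs.length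
decreasing_by
  · simp only [List.dropWhile_cons, *, if_pos, List.length_cons]
    exact Nat.lt_succ_of_le (List.length_dropWhile_le pvGood cs)
  · simp

-- B's for-loop over the tokens
def pvScanB : List (List Char) → String → List (String × String)
  | [], url => [("type", "unknown"), ("id", url)]
  | tok :: rest, url =>
    if tok.length = 15 then [("type", "file"), ("id", String.ofList tok)]
    else if tok.length = 13 then [("type", "directory"), ("id", String.ofList tok)]
    else pvScanB rest url

def get_mediafire_id_alt (url : String) : List (String × String) :=
  pvScanB (pvTokens url.toList) url

-- ===== PRECONDITION & SPEC =====
def Spec_get_mediafire_id (url : String) (out : List (String × String)) : Prop := out = get_mediafire_id_alt url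
instance (url : String) (out : List (String × String)) : Decidable (Spec_get_mediafire_id url out) := by unfold Spec_get_mediafire_id; infer_instance

-- ===== CLAIM (what is proved, stated in full; the proofs are below) =====
def Claim_equal_get_mediafire_id : Prop := ∀ (url : String), Dom_get_mediafire_id url → Spec_get_mediafire_id url (get_mediafire_id url)

-- ===== LEMMAS AND PROOFS =====

theorem pv_char_of_toNat (c : Char) (k : Nat) (h : Char.toNat c = k) : c = Char.ofNat k := by
  have := Char.ofNat_toNat c
  rw [h] at this
  rw [← this]

-- A's charset *string* holds exactly the chars of the regex class [a-z0-9]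
theorem pv_charset_eq (c : Char) :
    ("qwertyuiopasdfghjklzxcvbnm1234567890".toList.contains c) = pvGood c := by
  have hl : "qwertyuiopasdfghjklzxcvbnm1234567890".toList
      = ['q','w','e','r','t','y','u','i','o','p','a','s','d','f','g','h','j','k','l','z','x','c','v','b','n','m','1','2','3','4','5','6','7','8','9','0'] := by decide
  rw [hl]
  rw [show ∀ b1 b2 : Bool, b1 = b2 ↔ (b1 = true ↔ b2 = true) from fun b1 b2 => by
    constructor <;> intro h <;> [rw [h]; exact Bool.coe_iff_coe.mp h] ]
  constructor
  · intro h
    rw [List.contains_eq_mem, decide_eq_true_eq] at h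
    fin_cases h <;> decide
  · intro h
    simp only [pvGood, Bool.or_eq_true, Bool.and_eq_true, decide_eq_true_eq, Char.le_def,
      UInt32.le_iff_toNat_le] at h
    have h' : (97 ≤ c.toNat ∧ c.toNat ≤ 122) ∨ (48 ≤ c.toNat ∧ c.toNat ≤ 57) := h
    have h97 : 48 ≤ c.toNat := by omega
    have h122 : c.toNat ≤ 122 := by omega
    interval_cases hk : c.toNat <;>
      first
        | (rw [pv_char_of_toNat c _ hk]; decide)
        | omega

-- recursion form of A's first loop (stated with pvGood via pv_charset_eq)
def pvCands : List Char → List Char → List (List Char)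
  | [], cur => [cur]
  | c :: cs, cur => if pvGood c then pvCands cs (cur ++ [c]) else cur :: pvCands cs []

theorem pv_fold_eq (cs : List Char) (acc : List (List Char)) (cur : List Char) :
    (cs.foldl
      (fun (st : List (List Char) × List Char) char =>
        if pvGood char then (st.1, st.2 ++ [char]) else (st.1 ++ [st.2], []))
      (acc, cur)).1 ++
    [(cs.foldl
      (fun (st : List (List Char) × List Char) char =>
        if pvGood char then (st.1, st.2 ++ [char]) else (st.1 ++ [st.2], []))
      (acc, cur)).2] = acc ++ pvCands cs cur := by
  induction cs generalizing acc cur with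
  | nil => simp [pvCands]
  | cons c cs ih =>
    simp only [List.foldl_cons, pvCands]
    by_cases h : pvGood c = true
    · simp only [h, if_pos]
      exact ih acc (cur ++ [c])
    · simp only [eq_false_of_ne_true h, if_neg, Bool.false_eq_true, not_false_iff]
      rw [ih (acc ++ [cur]) []]
      simp

theorem pv_scanA_filter (l : List (List Char)) (url : String) :
    pvScanA l url = pvScanA (l.filter (fun s => !s.isEmpty)) url := by
  induction l with
  | nil => rfl
  | cons s l ih =>
    by_cases hs : s.isEmpty
    · have h0 : s.length = 0 := by
        cases s <;> simp_all [List.isEmpty]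
      simp [pvScanA, hs, h0, ih]
    · simp only [List.filter_cons, hs, Bool.not_false, if_pos]
      unfold pvScanA
      split_ifs <;> simp_all

theorem pv_cands_filter (cs cur : List Char) :
    (pvCands cs cur).filter (fun s => !s.isEmpty) =
      if cur.isEmpty then pvTokens cs
      else (cur ++ cs.takeWhile pvGood) :: pvTokens (cs.dropWhile pvGood) := by
  induction cs generalizing cur with
  | nil =>
    by_cases hc : cur.isEmpty <;>
      cases cur <;> simp_all [pvCands, pvTokens]
  | cons c cs ih =>
    by_cases h : pvGood c = true
    · have hne : ¬ (cur ++ [c]).isEmpty := by simp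
      simp only [pvCands, h, if_pos]
      rw [ih (cur ++ [c])]
      simp only [hne, if_neg, Bool.not_eq_true, List.takeWhile_cons, List.dropWhile_cons, h,
        if_pos]
      by_cases hc : cur.isEmpty
      · cases cur <;> simp_all [pvTokens]
      · simp [hc]
    · have h' : pvGood c = false := eq_false_of_ne_true h
      simp only [pvCands, h', Bool.false_eq_true, if_neg, not_false_iff, List.filter_cons]
      by_cases hc : cur.isEmpty
      · simp only [hc, Bool.not_true, if_neg, Bool.false_eq_true, not_false_iff, if_pos]
        rw [ih []]
        simp [pvTokens, h']
      · simp only [hc, Bool.not_false, if_pos]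
        rw [ih []]
        simp [pvTokens, h']

theorem pv_scan_eq (l : List (List Char)) (url : String) :
    pvScanA l url = pvScanB l url := by
  induction l with
  | nil => rfl
  | cons s l ih => unfold pvScanA pvScanB; split_ifs <;> simp_all

-- ===== VERDICT (by name: the statement is the Claim_ definition above) =====
theorem get_mediafire_id_spec : Claim_equal_get_mediafire_id := by
  intro url _
  unfold Spec_get_mediafire_id get_mediafire_id get_mediafire_id_alt
  have hstep : (fun (st : List (List Char) × List Char) char =>
      if "qwertyuiopasdfghjklzxcvbnm1234567890".toList.contains char then (st.1, st.2 ++ [char])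
      else (st.1 ++ [st.2], [])) =
    (fun (st : List (List Char) × List Char) char =>
      if pvGood char then (st.1, st.2 ++ [char]) else (st.1 ++ [st.2], [])) := by
    funext st char
    rw [pv_charset_eq]
  simp only [hstep]
  rw [pv_fold_eq, List.nil_append, pv_scanA_filter, pv_cands_filter, pv_scan_eq]
  simp
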